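-- pv_equiv track=rewrite | github.com/sanghyun-io/tunnelforge | src/core/migration_parsers.py | _split_definitions
-- ===== SOURCE A (Python) =====
-- from typing import List, Optional, Tuple, Union
--
-- def _split_definitions(body: str) -> List[str]:
--     """콤마로 정의 분리 (괄호 안 콤마 제외)"""
--     definitions = []
--     current = ""
--     depth = 0
--
--     for char in body:
--         if char == '(':
--             depth += 1
--             current += char
--         elif char == ')':
--             depth -= 1
--             current += char
--         elif char == ',' and depth == 0:
--             definitions.append(current.strip())
--             current = ""
--         else:
--             current += char
--
--     if current.strip():
--         definitions.append(current.strip())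
--
--     return definitions
-- ===== SOURCE B (Python) =====
-- def _find_top_comma(body):
--     depth = 0
--     for i, char in enumerate(body):
--         if char == '(':
--             depth += 1
--         elif char == ')':
--             depth -= 1
--         elif char == ',' and depth == 0:
--             return i
--     return None
--
--
-- def _split_definitions(body):
--     i = _find_top_comma(body)
--     if i is None:
--         tail = body.strip()
--         return [tail] if tail else []
--     return [body[:i].strip()] + _split_definitions(body[i + 1:])
-- ===== Notes on version B (the rewrite author's own statement) =====
-- stated objective: alternative
-- what changed: A accumulates the current piece character by character in one fold over a (pieces, current, depth) state; B instead recursively locates the first top-level comma (a depth-counting index scan), slices the string there, and recurses on the remainder.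
import Mathlib
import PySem

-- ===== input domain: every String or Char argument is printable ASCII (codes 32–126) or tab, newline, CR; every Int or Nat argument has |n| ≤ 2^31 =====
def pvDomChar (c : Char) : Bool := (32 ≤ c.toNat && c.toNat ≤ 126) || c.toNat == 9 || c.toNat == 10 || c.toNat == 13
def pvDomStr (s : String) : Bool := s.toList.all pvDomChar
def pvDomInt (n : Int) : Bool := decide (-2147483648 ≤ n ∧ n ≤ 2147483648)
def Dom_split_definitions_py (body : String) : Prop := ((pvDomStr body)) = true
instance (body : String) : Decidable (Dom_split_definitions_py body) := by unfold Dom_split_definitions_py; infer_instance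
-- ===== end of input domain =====

-- B re-decomposes A's single accumulating fold as find-first-top-level-comma + slice + recurse; same result, same cost.

-- ===== PORT A =====
-- loop body of A; state = (definitions, current, depth); strings handled as List Char via toList/ofList
def aStep (st : List (List Char) × List Char × Int) (c : Char) :
    List (List Char) × List Char × Int :=
  if c = '(' then (st.1, st.2.1 ++ [c], st.2.2 + 1)
  else if c = ')' then (st.1, st.2.1 ++ [c], st.2.2 - 1)
  else if c = ',' ∧ st.2.2 = 0 then (st.1 ++ [PySem.Chars.strip st.2.1], [], st.2.2)
  else (st.1, st.2.1 ++ [c], st.2.2)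

def split_definitions_py (body : String) : List String :=
  let st := body.toList.foldl aStep ([], [], 0)
  (if PySem.Chars.strip st.2.1 ≠ [] then st.1 ++ [PySem.Chars.strip st.2.1] else st.1).map
    (fun cs => String.ofList cs)

-- ===== PORT B =====
-- port of _find_top_comma: index of the first comma seen at depth 0 (scan starts at depth `depth`)
def findTopComma (cs : List Char) (depth : Int) : Option Nat :=
  match cs with
  | [] => none
  | c :: rest =>
    if c = '(' then (findTopComma rest (depth + 1)).map (· + 1)
    else if c = ')' then (findTopComma rest (depth - 1)).map (· + 1)
    else if c = ',' ∧ depth = 0 then some 0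
    else (findTopComma rest depth).map (· + 1)

-- needed for splitAlt's termination
theorem findTopComma_lt {cs : List Char} {d : Int} {i : Nat}
    (h : findTopComma cs d = some i) : i < cs.length := by
  induction cs generalizing d i with
  | nil => simp [findTopComma] at h
  | cons c rest ih =>
    unfold findTopComma at h
    split_ifs at h <;> simp_all
    all_goals first | (obtain ⟨j, hj, rfl⟩ := h; have := ih hj; omega) | omega

-- port of B's _split_definitions: slice at the first top-level comma and recurse on the remainder
def splitAlt (cs : List Char) : List (List Char) :=
  match h : findTopComma cs 0 with
  | none =>
      let tail := PySem.Chars.strip cs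
      if tail ≠ [] then [tail] else []
  | some i => PySem.Chars.strip (cs.take i) :: splitAlt (cs.drop (i + 1))
termination_by cs.length
decreasing_by
  have := findTopComma_lt h
  simp [List.length_drop]; omega

def split_definitions_py_alt (body : String) : List String :=
  (splitAlt body.toList).map (fun cs => String.ofList cs)

-- ===== PRECONDITION & SPEC =====
def Spec_split_definitions_py (body : String) (out : List String) : Prop := out = split_definitions_py_alt body
instance (body : String) (out : List String) : Decidable (Spec_split_definitions_py body out) := by unfold Spec_split_definitions_py; infer_instance

-- ===== CLAIM (what is proved, stated in full; the proofs are below) =====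
def Claim_equal_split_definitions_py : Prop := ∀ (body : String), Dom_split_definitions_py body → Spec_split_definitions_py body (split_definitions_py body)

-- ===== LEMMAS AND PROOFS =====

-- if no top-level comma remains, A's loop only extends `current` by the rest of the input
theorem foldl_aStep_none (cs : List Char) (defs : List (List Char)) (cur : List Char) (d : Int)
    (h : findTopComma cs d = none) :
    (cs.foldl aStep (defs, cur, d)).1 = defs ∧ (cs.foldl aStep (defs, cur, d)).2.1 = cur ++ cs := by
  induction cs generalizing defs cur d with
  | nil => simp
  | cons c rest ih =>
    unfold findTopComma at h
    split_ifs at h with h1 h2 h3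
    · simp only [Option.map_eq_none_iff] at h
      simp only [List.foldl_cons, aStep, if_pos h1]
      simpa using ih defs (cur ++ [c]) (d + 1) h
    · simp only [Option.map_eq_none_iff] at h
      simp only [List.foldl_cons, aStep, if_neg h1, if_pos h2]
      simpa using ih defs (cur ++ [c]) (d - 1) h
    · simp only [Option.map_eq_none_iff] at h
      simp only [List.foldl_cons, aStep, if_neg h1, if_neg h2, if_neg h3]
      simpa using ih defs (cur ++ [c]) d h

-- A's loop run past the first top-level comma = append the stripped piece, reset, continue after it
theorem foldl_aStep_some (cs : List Char) (i : Nat) (defs : List (List Char)) (cur : List Char)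
    (d : Int) (h : findTopComma cs d = some i) :
    cs.foldl aStep (defs, cur, d) =
      (cs.drop (i + 1)).foldl aStep (defs ++ [PySem.Chars.strip (cur ++ cs.take i)], [], 0) := by
  induction cs generalizing i defs cur d with
  | nil => simp [findTopComma] at h
  | cons c rest ih =>
    unfold findTopComma at h
    split_ifs at h with h1 h2 h3
    · simp only [Option.map_eq_some_iff] at h
      obtain ⟨j, hj, rfl⟩ := h
      simp only [List.foldl_cons, aStep, if_pos h1]
      rw [ih j defs (cur ++ [c]) (d + 1) hj]
      simp [h1]
    · simp only [Option.map_eq_some_iff] at h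
      obtain ⟨j, hj, rfl⟩ := h
      simp only [List.foldl_cons, aStep, if_neg h1, if_pos h2]
      rw [ih j defs (cur ++ [c]) (d - 1) hj]
      simp [h2]
    · obtain rfl : 0 = i := by simpa using h
      obtain ⟨rfl, rfl⟩ := h3
      simp [List.foldl_cons, aStep]
    · simp only [Option.map_eq_some_iff] at h
      obtain ⟨j, hj, rfl⟩ := h
      simp only [List.foldl_cons, aStep, if_neg h1, if_neg h2, if_neg h3]
      rw [ih j defs (cur ++ [c]) d hj]
      simp

theorem splitAlt_none {cs : List Char} (h : findTopComma cs 0 = none) :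
    splitAlt cs = if PySem.Chars.strip cs ≠ [] then [PySem.Chars.strip cs] else [] := by
  rw [splitAlt.eq_def]
  split <;> simp_all

theorem splitAlt_some {cs : List Char} {i : Nat} (h : findTopComma cs 0 = some i) :
    splitAlt cs = PySem.Chars.strip (cs.take i) :: splitAlt (cs.drop (i + 1)) := by
  rw [splitAlt.eq_def]
  split <;> simp_all

-- A's finishing step applied to the final loop state
def aFinish (st : List (List Char) × List Char × Int) : List (List Char) :=
  if PySem.Chars.strip st.2.1 ≠ [] then st.1 ++ [PySem.Chars.strip st.2.1] else st.1

theorem main_lemma (n : Nat) : ∀ (cs : List Char), cs.length ≤ n → ∀ (defs : List (List Char)),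
    aFinish (cs.foldl aStep (defs, [], 0)) = defs ++ splitAlt cs := by
  induction n with
  | zero =>
    intro cs hcs defs
    obtain rfl : cs = [] := List.eq_nil_of_length_eq_zero (Nat.le_zero.mp hcs)
    have hs : PySem.Chars.strip ([] : List Char) = [] := by decide
    rw [splitAlt_none (by simp [findTopComma])]
    simp [aFinish, hs]
  | succ n ih =>
    intro cs hcs defs
    cases h : findTopComma cs 0 with
    | none =>
      obtain ⟨h1, h2⟩ := foldl_aStep_none cs defs [] 0 h
      rw [splitAlt_none h]
      simp only [aFinish, h1, h2, List.nil_append]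
      split_ifs <;> simp
    | some i =>
      have hi := findTopComma_lt h
      rw [foldl_aStep_some cs i defs [] 0 h]
      rw [ih (cs.drop (i + 1)) (by simp; omega) (defs ++ [PySem.Chars.strip ([] ++ cs.take i)])]
      rw [splitAlt_some h]
      simp

-- ===== VERDICT (by name: the statement is the Claim_ definition above) =====
theorem split_definitions_py_spec : Claim_equal_split_definitions_py := by
  intro body _
  unfold Spec_split_definitions_py split_definitions_py split_definitions_py_alt
  have := main_lemma body.toList.length body.toList le_rfl []
  simp only [aFinish] at this
  simp [this]
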